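-- pv_equiv track=rewrite | github.com/cabouman/xcal | ipynb/exp15_sim_sepanalmodel.py | find_element_change_indexes
-- ===== SOURCE A (Python) =====
-- def find_element_change_indexes(lst):
--     start_indexes = [0]
--     current_element = lst[0]
--
--     for i in range(1, len(lst)):
--         if lst[i] != current_element:
--             start_indexes.append(i)
--             current_element = lst[i]
--
--     return start_indexes
-- ===== SOURCE B (Python) =====
-- from itertools import groupby, accumulate
--
-- def find_element_change_indexes(lst):
--     lengths = [sum(1 for _ in g) for _, g in groupby(lst)]
--     return list(accumulate(lengths[:-1], initial=0))
-- ===== Notes on version B (the rewrite author's own statement) =====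
-- stated objective: idiomatic
-- what changed: Replaces the neighbour-comparison loop with a group-then-prefix-sum computation: groupby collapses the list into equal runs and accumulate over the run lengths yields each run's start index.
import Mathlib
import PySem

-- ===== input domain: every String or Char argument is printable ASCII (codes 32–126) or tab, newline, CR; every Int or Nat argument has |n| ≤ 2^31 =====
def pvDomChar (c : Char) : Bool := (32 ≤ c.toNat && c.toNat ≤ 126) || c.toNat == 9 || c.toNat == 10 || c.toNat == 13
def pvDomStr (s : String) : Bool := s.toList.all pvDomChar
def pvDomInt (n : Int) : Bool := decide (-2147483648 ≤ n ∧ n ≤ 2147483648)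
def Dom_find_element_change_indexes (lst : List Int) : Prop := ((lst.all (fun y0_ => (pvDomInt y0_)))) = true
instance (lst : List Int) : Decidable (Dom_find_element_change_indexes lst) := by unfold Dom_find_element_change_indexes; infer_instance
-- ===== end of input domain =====

-- B replaces A's neighbour-comparison loop with groupby run lengths + prefix sums (idiomatic decomposition, same O(n) cost).

-- ===== PORT A =====
-- loop 'for i in range(1, len(lst)): if lst[i] != current: append i; current := lst[i]'
def find_element_change_indexes (lst : List Int) : List Int :=
  (((PySem.List.pyRange 1 (lst.length : Int) 1).foldl
      (fun (s : List Int × Int) i =>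
        if PySem.List.pyGetD lst i 0 ≠ s.2
        then (s.1 ++ [i], PySem.List.pyGetD lst i 0)
        else s)
      ([0], lst.headD 0))).1

-- ===== PORT B =====
-- run lengths of consecutive equal elements (itertools.groupby + per-group count)
def pvRunAux (cur : Int) (cnt : Int) : List Int → List Int
  | [] => [cnt]
  | y :: ys => if y = cur then pvRunAux cur (cnt + 1) ys else cnt :: pvRunAux y 1 ys

def pvRunLengths : List Int → List Int
  | [] => []
  | x :: xs => pvRunAux x 1 xs

-- itertools.accumulate(ls, initial := init)
def pvAccum (init : Int) : List Int → List Int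
  | [] => [init]
  | l :: ls => init :: pvAccum (init + l) ls

def find_element_change_indexes_alt (lst : List Int) : List Int :=
  pvAccum 0 ((pvRunLengths lst).dropLast)

-- ===== PRECONDITION & SPEC =====
-- A raises IndexError on the empty list (lst[0]); that input is excluded.
def Pre_find_element_change_indexes (lst : List Int) : Prop := lst ≠ []
instance (lst : List Int) : Decidable (Pre_find_element_change_indexes lst) := by unfold Pre_find_element_change_indexes; infer_instance
def pvWitness_find_element_change_indexes : List Int := [1, 1, 2]

def Spec_find_element_change_indexes (lst : List Int) (out : List Int) : Prop := out = find_element_change_indexes_alt lst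
instance (lst : List Int) (out : List Int) : Decidable (Spec_find_element_change_indexes lst out) := by unfold Spec_find_element_change_indexes; infer_instance

-- ===== CLAIM (what is proved, stated in full; the proofs are below) =====
def Claim_equal_find_element_change_indexes : Prop := ∀ (lst : List Int), Dom_find_element_change_indexes lst → Pre_find_element_change_indexes lst → Spec_find_element_change_indexes lst (find_element_change_indexes lst)

-- ===== LEMMAS AND PROOFS =====

-- common reference: the change indexes of ys, with current element cur and next index i
def pvChangeIdx (cur i : Int) : List Int → List Int
  | [] => []
  | y :: ys => if y ≠ cur then i :: pvChangeIdx y (i + 1) ys else pvChangeIdx cur (i + 1) ys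

lemma pvRunAux_ne_nil (cur cnt : Int) (ys : List Int) : pvRunAux cur cnt ys ≠ [] := by
  induction ys generalizing cur cnt with
  | nil => simp [pvRunAux]
  | cons y ys ih =>
    by_cases h : y = cur <;> simp [pvRunAux, h, ih]

lemma pvAccum_runAux (ys : List Int) : ∀ (cur cnt s : Int),
    pvAccum s ((pvRunAux cur cnt ys).dropLast) = s :: pvChangeIdx cur (s + cnt) ys := by
  induction ys with
  | nil => intro cur cnt s; simp [pvRunAux, pvAccum, pvChangeIdx]
  | cons y ys ih =>
    intro cur cnt s
    by_cases h : y = cur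
    · subst h
      rw [show pvRunAux y cnt (y :: ys) = pvRunAux y (cnt + 1) ys by simp [pvRunAux]]
      rw [ih y (cnt + 1) s]
      simp [pvChangeIdx, add_assoc]
    · simp only [pvRunAux, if_neg h, pvChangeIdx, if_pos (by exact h)]
      rw [List.dropLast_cons_of_ne_nil (pvRunAux_ne_nil y 1 ys)]
      simp only [pvAccum]
      rw [ih y 1 (s + cnt)]

lemma pvA_loop (ys : List Int) : ∀ (pre acc : List Int) (cur : Int),
    (((PySem.List.pyRange (pre.length : Int) ((pre.length + ys.length : Nat) : Int) 1).foldl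
        (fun (s : List Int × Int) i =>
          if PySem.List.pyGetD (pre ++ ys) i 0 ≠ s.2
          then (s.1 ++ [i], PySem.List.pyGetD (pre ++ ys) i 0)
          else s)
        (acc, cur))).1 = acc ++ pvChangeIdx cur (pre.length : Int) ys := by
  induction ys with
  | nil =>
    intro pre acc cur
    rw [PySem.List.pyRange_one_eq_nil (by simp)]
    simp [pvChangeIdx]
  | cons y ys ih =>
    intro pre acc cur
    have hlt : (pre.length : Int) < ((pre.length + (y :: ys).length : Nat) : Int) := by
      simp
    rw [PySem.List.pyRange_one_cons hlt]
    simp only [List.foldl_cons]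
    have hget : PySem.List.pyGetD (pre ++ y :: ys) (pre.length : Int) 0 = y := by
      rw [PySem.List.pyGetD_natCast]
      simp
    have hcast : ((pre.length : Int) + 1) = (((pre ++ [y]).length : Nat) : Int) := by
      simp
    have hlen : ((pre.length + (y :: ys).length : Nat) : Int) = (((pre ++ [y]).length + ys.length : Nat) : Int) := by
      simp; omega
    have happ : pre ++ y :: ys = (pre ++ [y]) ++ ys := by simp
    by_cases h : y = cur
    · rw [hget, if_neg (by simp [h])]
      rw [hcast, hlen, happ, ih (pre ++ [y]) acc cur]
      simp [pvChangeIdx, h]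
    · rw [hget, if_pos (by exact h)]
      rw [hcast, hlen, happ, ih (pre ++ [y]) (acc ++ [(pre.length : Int)]) y]
      simp [pvChangeIdx, h]

lemma pvA_eq (x : Int) (xs : List Int) :
    find_element_change_indexes (x :: xs) = 0 :: pvChangeIdx x 1 xs := by
  have h := pvA_loop xs [x] [0] x
  simpa [find_element_change_indexes, Int.add_comm] using h

lemma pvB_eq (x : Int) (xs : List Int) :
    find_element_change_indexes_alt (x :: xs) = 0 :: pvChangeIdx x 1 xs := by
  have h := pvAccum_runAux xs x 1 0
  simpa [find_element_change_indexes_alt, pvRunLengths] using h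

-- ===== VERDICT (by name: the statement is the Claim_ definition above) =====
theorem find_element_change_indexes_spec : Claim_equal_find_element_change_indexes := by
  intro lst _ hpre
  unfold Spec_find_element_change_indexes
  cases lst with
  | nil => exact absurd rfl hpre
  | cons x xs => rw [pvA_eq, pvB_eq]
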